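-- pv_equiv track=rewrite | github.com/TuhinKundu/keyphrase_gen | utilities/utils.py | preprocess_one2seq_predictions_to_kps
-- ===== SOURCE A (Python) =====
-- def preprocess_one2seq_predictions_to_kps(predictions):
--     processed_kps = []
--     for i, pred in enumerate(predictions):
--         kp_collect = []
--         kps = []
--         for j, token in enumerate(pred):
--             if token == '<sep>':
--                 if len(kp_collect) > 0:
--                     kps.append(' '.join(kp_collect))
--                     kp_collect = []
--             else:
--                 kp_collect.append(token)
--         if len(kp_collect) > 0:
--             kps.append(' '.join(kp_collect))
--         processed_kps.append(kps)
--     return processed_kps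
-- ===== SOURCE B (Python) =====
-- def preprocess_one2seq_predictions_to_kps(predictions):
--     def split_kps(tokens):
--         kps = []
--         pos, n = 0, len(tokens)
--         while pos < n:
--             if tokens[pos] == '<sep>':
--                 pos += 1
--             else:
--                 end = pos
--                 while end < n and tokens[end] != '<sep>':
--                     end += 1
--                 kps.append(' '.join(tokens[pos:end]))
--                 pos = end
--         return kps
--     return [split_kps(pred) for pred in predictions]
-- ===== Notes on version B (the rewrite author's own statement) =====
-- stated objective: alternative
-- what changed: Replaces A's token-by-token accumulator loop (kp_collect flushed on each separator) with a two-pointer span scanner that skips separators and slices out each maximal non-separator run in one step, joining the slice directly.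
import Mathlib
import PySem

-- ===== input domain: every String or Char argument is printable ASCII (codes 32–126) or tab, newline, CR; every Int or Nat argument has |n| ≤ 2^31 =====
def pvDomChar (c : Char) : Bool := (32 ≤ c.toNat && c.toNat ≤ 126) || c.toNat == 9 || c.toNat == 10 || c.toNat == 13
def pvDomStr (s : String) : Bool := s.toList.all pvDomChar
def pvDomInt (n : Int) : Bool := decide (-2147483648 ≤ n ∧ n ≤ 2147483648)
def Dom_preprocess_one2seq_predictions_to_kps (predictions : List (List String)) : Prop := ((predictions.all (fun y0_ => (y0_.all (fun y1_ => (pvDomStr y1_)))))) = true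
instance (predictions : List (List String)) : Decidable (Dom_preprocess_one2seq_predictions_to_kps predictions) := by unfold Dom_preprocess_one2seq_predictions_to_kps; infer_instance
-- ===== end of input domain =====

-- B replaces A's token-by-token accumulator loop with a two-pointer span scanner that
-- skips separators and slices out each maximal non-separator run in one step (alternative decomposition, same cost).

-- ===== PORT A =====
-- inner loop body: state (kp_collect, kps), one token
def pvStepA (st : List String × List String) (token : String) : List String × List String :=
  if token == "<sep>" then
    if st.1.length > 0 then ([], st.2 ++ [PySem.Str.join " " st.1]) else st
  else (st.1 ++ [token], st.2)

def preprocess_one2seq_predictions_to_kps (predictions : List (List String)) : List (List String) :=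
  predictions.foldl (fun processed_kps pred =>
    let st := pred.foldl pvStepA ([], [])
    processed_kps ++ [if st.1.length > 0 then st.2 ++ [PySem.Str.join " " st.1] else st.2]) []

-- ===== PORT B =====
-- the two-pointer scan of Source B: skipping one '<sep>' = recurse on the tail; the inner
-- 'end' scan to the next '<sep>' plus 'tokens[pos:end]' / 'pos = end' = takeWhile / dropWhile (exact)
def pvSplitKps : List String → List String
  | [] => []
  | t :: rest =>
    if t == "<sep>" then pvSplitKps rest
    else PySem.Str.join " " ((t :: rest).takeWhile (· != "<sep>"))
           :: pvSplitKps ((t :: rest).dropWhile (· != "<sep>"))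
termination_by xs => xs.length
decreasing_by
  · simp
  · have h1 : (t != "<sep>") = true := by simp_all
    simp only [List.dropWhile_cons, h1, if_pos]
    have := List.length_dropWhile_le (fun s => s != "<sep>") rest
    simp; omega

def preprocess_one2seq_predictions_to_kps_alt (predictions : List (List String)) : List (List String) :=
  predictions.map pvSplitKps

-- ===== PRECONDITION & SPEC =====
def Spec_preprocess_one2seq_predictions_to_kps (predictions : List (List String)) (out : List (List String)) : Prop := out = preprocess_one2seq_predictions_to_kps_alt predictions
instance (predictions : List (List String)) (out : List (List String)) : Decidable (Spec_preprocess_one2seq_predictions_to_kps predictions out) := by unfold Spec_preprocess_one2seq_predictions_to_kps; infer_instance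

-- ===== CLAIM (what is proved, stated in full; the proofs are below) =====
def Claim_equal_preprocess_one2seq_predictions_to_kps : Prop := ∀ (predictions : List (List String)), Dom_preprocess_one2seq_predictions_to_kps predictions → Spec_preprocess_one2seq_predictions_to_kps predictions (preprocess_one2seq_predictions_to_kps predictions)

-- ===== LEMMAS AND PROOFS =====

-- flush the pending kp_collect, as A does after the loop
def pvFinish (st : List String × List String) : List String :=
  if st.1.length > 0 then st.2 ++ [PySem.Str.join " " st.1] else st.2

theorem pv_takeWhile_append {p : String → Bool} (kp l : List String)
    (h : ∀ t ∈ kp, p t = true) : (kp ++ l).takeWhile p = kp ++ l.takeWhile p := by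
  induction kp with
  | nil => simp
  | cons a as ih =>
    simp only [List.cons_append, List.takeWhile_cons, h a (by simp)]
    simp [ih (fun t ht => h t (by simp [ht]))]

theorem pv_dropWhile_append {p : String → Bool} (kp l : List String)
    (h : ∀ t ∈ kp, p t = true) : (kp ++ l).dropWhile p = l.dropWhile p := by
  induction kp with
  | nil => simp
  | cons a as ih =>
    simp only [List.cons_append, List.dropWhile_cons, h a (by simp)]
    simp [ih (fun t ht => h t (by simp [ht]))]

-- main invariant: flushing A's fold state = prefix kps plus B's scan of (pending ++ remaining)
theorem pv_key : ∀ (xs kp kps : List String), (∀ t ∈ kp, (t == "<sep>") = false) →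
    pvFinish (xs.foldl pvStepA (kp, kps)) = kps ++ pvSplitKps (kp ++ xs) := by
  intro xs
  induction xs with
  | nil =>
    intro kp kps h
    simp only [List.foldl_nil, List.append_nil]
    cases kp with
    | nil => simp [pvFinish, pvSplitKps]
    | cons k ks =>
      rw [pvSplitKps]
      have hk : (k == "<sep>") = false := h k (by simp)
      have hall : ∀ t ∈ (k :: ks), (t != "<sep>") = true := by
        intro t ht; have := h t ht; simp_all
      have e3 : (k :: ks).dropWhile (· != "<sep>") = [] := by
        rw [List.dropWhile_eq_nil_iff]; intro x hx; exact hall x hx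
      simp [pvFinish, hk, List.takeWhile_eq_self_iff.mpr hall, e3, pvSplitKps]
  | cons t xs ih =>
    intro kp kps h
    simp only [List.foldl_cons]
    by_cases ht : (t == "<sep>") = true
    · cases kp with
      | nil =>
        have : pvStepA ([], kps) t = ([], kps) := by simp [pvStepA, ht]
        rw [this, ih [] kps (by simp)]
        have hteq : t = "<sep>" := by simpa using ht
        simp [pvSplitKps, hteq]
      | cons k ks =>
        have : pvStepA (k :: ks, kps) t
            = ([], kps ++ [PySem.Str.join " " (k :: ks)]) := by simp [pvStepA, ht]
        rw [this, ih [] _ (by simp)]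
        have hall : ∀ u ∈ (k :: ks), (u != "<sep>") = true := by
          intro u hu; have := h u hu; simp_all
        have hk : (k == "<sep>") = false := h k (by simp)
        have hteq : t = "<sep>" := by simpa using ht
        have e1 : ((k :: ks) ++ t :: xs).takeWhile (· != "<sep>") = k :: ks := by
          rw [pv_takeWhile_append _ _ hall]
          simp [hteq]
        have e2 : ((k :: ks) ++ t :: xs).dropWhile (· != "<sep>") = t :: xs := by
          rw [pv_dropWhile_append _ _ hall]
          simp [hteq]
        conv_rhs => rw [List.cons_append, pvSplitKps]
        rw [← List.cons_append]
        simp only [hk, Bool.false_eq_true, e1, e2]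
        rw [pvSplitKps]
        simp [hteq]
    · have ht' : (t == "<sep>") = false := by simp_all
      have : pvStepA (kp, kps) t = (kp ++ [t], kps) := by simp [pvStepA, ht']
      rw [this, ih (kp ++ [t]) kps (by
        intro u hu
        rcases List.mem_append.mp hu with h1 | h1
        · exact h u h1
        · simp_all)]
      simp

theorem pv_pred (pred : List String) :
    (if (pred.foldl pvStepA ([], [])).1.length > 0
       then (pred.foldl pvStepA ([], [])).2 ++ [PySem.Str.join " " (pred.foldl pvStepA ([], [])).1]
       else (pred.foldl pvStepA ([], [])).2) = pvSplitKps pred := by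
  have := pv_key pred [] [] (by simp)
  simpa [pvFinish] using this

theorem pv_outer (l : List (List String)) (acc : List (List String)) :
    l.foldl (fun processed_kps pred =>
      let st := pred.foldl pvStepA ([], [])
      processed_kps ++ [if st.1.length > 0 then st.2 ++ [PySem.Str.join " " st.1] else st.2]) acc
    = acc ++ l.map pvSplitKps := by
  induction l generalizing acc with
  | nil => simp
  | cons p ps ih => simp [ih, pv_pred p]

-- ===== VERDICT (by name: the statement is the Claim_ definition above) =====
theorem preprocess_one2seq_predictions_to_kps_spec : Claim_equal_preprocess_one2seq_predictions_to_kps := by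
  intro predictions _
  unfold Spec_preprocess_one2seq_predictions_to_kps preprocess_one2seq_predictions_to_kps preprocess_one2seq_predictions_to_kps_alt
  simpa using pv_outer predictions []
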